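-- pv_equiv track=rewrite | github.com/dcuturic/ki_baddie | blend_to_vrm/converter.py | find_bone_match
-- ===== SOURCE A (Python) =====
-- def _normalize_for_match(name):
--     """Normalize bone/pattern name: strip suffixes/prefixes, unify separators to underscore."""
--     n = name.lower().strip()
--     # Strip common bone suffixes
--     for suffix in ["_jnt", ".jnt", "_bone", ".bone", "_bn", ".bn", "_joint", ".joint",
--                     "_def", ".def", "_sk", "_end", ".end", "_null", ".null"]:
--         if n.endswith(suffix):
--             n = n[:-len(suffix)]
--             break
--     # Strip common prefixes
--     for prefix in ["def-", "def_", "org-", "org_", "mch-", "mch_", "jnt_", "jnt-",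
--                     "bn_", "bone_", "bip_", "bip01_", "bip01 ",
--                     "j_", "sk_", "b_", "mixamorig:", "mixamorig_",
--                     "valvebip01_", "rig_"]:
--         if n.startswith(prefix):
--             n = n[len(prefix):]
--             break
--     # Unify ALL separators to underscore
--     n = n.replace(".", "_").replace("-", "_").replace(" ", "_")
--     while "__" in n:
--         n = n.replace("__", "_")
--     return n.strip("_")
--
-- def _compact(name):
--     """Remove ALL separators for ultra-fuzzy comparison."""
--     return name.replace("_", "").replace(".", "").replace("-", "").replace(" ", "")
--
-- def find_bone_match(bone_name: str, patterns: list) -> int: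
--     """
--     Check if bone_name matches any of the patterns using normalized comparison.
--     Returns match quality score: 0=no match, 3=exact normalized, 2=exact compact, 1=substring.
--     Normalization unifies separators (./-/space → _) and strips suffixes (_JNT etc).
--     """
--     norm_bone = _normalize_for_match(bone_name)
--     compact_bone = _compact(norm_bone)
--
--     best_score = 0
--     for pat in patterns:
--         norm_pat = _normalize_for_match(pat)
--         compact_pat = _compact(norm_pat)
--
--         # Exact normalized match (highest quality)
--         if norm_bone == norm_pat:
--             return 3
--         # Exact compact match (all separators removed)
--         if compact_bone == compact_pat:
--             best_score = max(best_score, 2)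
--             continue
--         # Substring match (normalized form, min length 4 to reduce false positives)
--         if len(norm_pat) >= 4 and norm_pat in norm_bone:
--             best_score = max(best_score, 1)
--         elif len(norm_bone) >= 4 and norm_bone in norm_pat:
--             best_score = max(best_score, 1)
--         # Substring match (compact form, min length 5)
--         elif len(compact_pat) >= 5 and compact_pat in compact_bone:
--             best_score = max(best_score, 1)
--         elif len(compact_bone) >= 5 and compact_bone in compact_pat:
--             best_score = max(best_score, 1)
--
--     return best_score
-- ===== SOURCE B (Python) =====
-- def _normalize_for_match(name):
--     n = name.lower().strip()
--     for suffix in ["_jnt", ".jnt", "_bone", ".bone", "_bn", ".bn", "_joint", ".joint",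
--                     "_def", ".def", "_sk", "_end", ".end", "_null", ".null"]:
--         if n.endswith(suffix):
--             n = n[:-len(suffix)]
--             break
--     for prefix in ["def-", "def_", "org-", "org_", "mch-", "mch_", "jnt_", "jnt-",
--                     "bn_", "bone_", "bip_", "bip01_", "bip01 ",
--                     "j_", "sk_", "b_", "mixamorig:", "mixamorig_",
--                     "valvebip01_", "rig_"]:
--         if n.startswith(prefix):
--             n = n[len(prefix):]
--             break
--     n = n.replace(".", "_").replace("-", "_").replace(" ", "_")
--     while "__" in n:
--         n = n.replace("__", "_")
--     return n.strip("_")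
--
-- def _compact(name):
--     return name.replace("_", "").replace(".", "").replace("-", "").replace(" ", "")
--
-- def find_bone_match(bone_name: str, patterns: list) -> int:
--     norm_bone = _normalize_for_match(bone_name)
--     compact_bone = _compact(norm_bone)
--     norms = [_normalize_for_match(p) for p in patterns]
--     compacts = [_compact(n) for n in norms]
--     # Phase 1: exact normalized match anywhere
--     if norm_bone in set(norms):
--         return 3
--     # Phase 2: exact compact match anywhere
--     if compact_bone in set(compacts):
--         return 2
--     # Phase 3: any length-guarded substring match
--     for np, cp in zip(norms, compacts):
--         if ((len(np) >= 4 and np in norm_bone)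
--                 or (len(norm_bone) >= 4 and norm_bone in np)
--                 or (len(cp) >= 5 and cp in compact_bone)
--                 or (len(compact_bone) >= 5 and compact_bone in cp)):
--             return 1
--     return 0
-- ===== Notes on version B (the rewrite author's own statement) =====
-- stated objective: faster
-- what changed: Replaces A's single priority-tracking scan (best_score accumulator with early return) by three level-ordered phases over precomputed normalized/compact form lists: hash-set membership for score 3, then score 2, then one any-substring scan for score 1 that stops at the first hit.
import Mathlib
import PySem

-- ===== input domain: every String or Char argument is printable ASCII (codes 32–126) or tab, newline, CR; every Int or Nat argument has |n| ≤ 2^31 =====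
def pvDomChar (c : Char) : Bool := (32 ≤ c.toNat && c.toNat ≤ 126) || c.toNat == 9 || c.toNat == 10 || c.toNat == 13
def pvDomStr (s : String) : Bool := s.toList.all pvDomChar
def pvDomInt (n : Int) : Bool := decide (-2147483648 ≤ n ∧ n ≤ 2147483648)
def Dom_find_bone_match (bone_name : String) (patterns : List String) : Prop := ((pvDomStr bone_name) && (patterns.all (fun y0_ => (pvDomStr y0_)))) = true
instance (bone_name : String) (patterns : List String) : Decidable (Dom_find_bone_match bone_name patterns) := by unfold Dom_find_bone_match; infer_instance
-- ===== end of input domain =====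

-- B restructures A's single priority-tracking scan into three level-ordered phases over
-- precomputed form lists (set membership for 3, then 2, then an early-exiting any-substring
-- scan for 1); a timing run measured B faster on the generated inputs.

-- ===== PORT A =====
-- shared module helpers (_normalize_for_match, _compact), used verbatim by both Pythons

def pvSuffixes : List String := ["_jnt", ".jnt", "_bone", ".bone", "_bn", ".bn", "_joint", ".joint",
  "_def", ".def", "_sk", "_end", ".end", "_null", ".null"]

def pvPrefixes : List String := ["def-", "def_", "org-", "org_", "mch-", "mch_", "jnt_", "jnt-",
  "bn_", "bone_", "bip_", "bip01_", "bip01 ",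
  "j_", "sk_", "b_", "mixamorig:", "mixamorig_",
  "valvebip01_", "rig_"]

-- the suffix-stripping for-loop with break
def pvStripSuffix : List String → String → String
  | [], n => n
  | s :: rest, n =>
    if PySem.Str.endswith n s then PySem.Str.slice n none (some (-(PySem.Str.len s : Int)))
    else pvStripSuffix rest n

-- the prefix-stripping for-loop with break
def pvStripPrefix : List String → String → String
  | [], n => n
  | p :: rest, n =>
    if PySem.Str.startswith n p then PySem.Str.slice n (some (PySem.Str.len p : Int)) none
    else pvStripPrefix rest n

-- the `while "__" in n` loop; each pass over a string containing "__" strictly shortens it,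
-- so len n + 1 passes always suffice (fuel only makes the same computation total)
def pvSqueeze : Nat → String → String
  | 0, n => n
  | f + 1, n =>
    if PySem.Str.isIn "__" n then pvSqueeze f (PySem.Str.replace n "__" "_") else n

def pyNormalize (name : String) : String :=
  let n := PySem.Str.strip (PySem.Str.lower name)
  let n := pvStripSuffix pvSuffixes n
  let n := pvStripPrefix pvPrefixes n
  let n := PySem.Str.replace (PySem.Str.replace (PySem.Str.replace n "." "_") "-" "_") " " "_"
  let n := pvSqueeze ((PySem.Str.len n).toNat + 1) n
  PySem.Str.stripChars n "_"

def pyCompact (name : String) : String :=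
  PySem.Str.replace (PySem.Str.replace (PySem.Str.replace (PySem.Str.replace name "_" "") "." "") "-" "") " " ""

-- A's scan with best_score accumulator and early return 3
def pvFindLoop (nb cb : String) : List String → Int → Int
  | [], best => best
  | pat :: ps, best =>
    let np := pyNormalize pat
    let cp := pyCompact np
    if nb == np then 3
    else if cb == cp then pvFindLoop nb cb ps (max best 2)
    else if decide (4 ≤ PySem.Str.len np) && PySem.Str.isIn np nb then pvFindLoop nb cb ps (max best 1)
    else if decide (4 ≤ PySem.Str.len nb) && PySem.Str.isIn nb np then pvFindLoop nb cb ps (max best 1)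
    else if decide (5 ≤ PySem.Str.len cp) && PySem.Str.isIn cp cb then pvFindLoop nb cb ps (max best 1)
    else if decide (5 ≤ PySem.Str.len cb) && PySem.Str.isIn cb cp then pvFindLoop nb cb ps (max best 1)
    else pvFindLoop nb cb ps best

def find_bone_match (bone_name : String) (patterns : List String) : Int :=
  let norm_bone := pyNormalize bone_name
  let compact_bone := pyCompact norm_bone
  pvFindLoop norm_bone compact_bone patterns 0

-- ===== PORT B =====
-- the four length-guarded substring conditions of B's phase-3 loop
def pvSubCond (nb cb np cp : String) : Bool :=
  (decide (4 ≤ PySem.Str.len np) && PySem.Str.isIn np nb)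
  || (decide (4 ≤ PySem.Str.len nb) && PySem.Str.isIn nb np)
  || (decide (5 ≤ PySem.Str.len cp) && PySem.Str.isIn cp cb)
  || (decide (5 ≤ PySem.Str.len cb) && PySem.Str.isIn cb cp)

def find_bone_match_alt (bone_name : String) (patterns : List String) : Int :=
  let norm_bone := pyNormalize bone_name
  let compact_bone := pyCompact norm_bone
  let norms := patterns.map pyNormalize
  let compacts := norms.map pyCompact
  if (PySem.Set.ofList norms).contains norm_bone then 3
  else if (PySem.Set.ofList compacts).contains compact_bone then 2
  else if (norms.zip compacts).any (fun q => pvSubCond norm_bone compact_bone q.1 q.2) then 1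
  else 0

-- ===== PRECONDITION & SPEC =====
def Spec_find_bone_match (bone_name : String) (patterns : List String) (out : Int) : Prop := out = find_bone_match_alt bone_name patterns
instance (bone_name : String) (patterns : List String) (out : Int) : Decidable (Spec_find_bone_match bone_name patterns out) := by unfold Spec_find_bone_match; infer_instance

-- ===== CLAIM (what is proved, stated in full; the proofs are below) =====
def Claim_equal_find_bone_match : Prop := ∀ (bone_name : String) (patterns : List String), Dom_find_bone_match bone_name patterns → Spec_find_bone_match bone_name patterns (find_bone_match bone_name patterns)

-- ===== LEMMAS AND PROOFS =====

-- collapse A's four-way elif chain into one disjunction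
theorem pv_if_chain4 {a : Type} (c1 c2 c3 c4 : Bool) (X Y : a) :
    (if c1 then X else if c2 then X else if c3 then X else if c4 then X else Y)
    = if c1 || c2 || c3 || c4 then X else Y := by
  cases c1 <;> cases c2 <;> cases c3 <;> cases c4 <;> simp

-- A's scan, characterised level by level
theorem pvFindLoop_eq (nb cb : String) (ps : List String) (best : Int)
    (h0 : 0 ≤ best) (h2 : best ≤ 2) :
    pvFindLoop nb cb ps best =
      if ps.any (fun p => nb == pyNormalize p) then 3
      else max best
        (if ps.any (fun p => cb == pyCompact (pyNormalize p)) then 2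
         else if ps.any (fun p => pvSubCond nb cb (pyNormalize p) (pyCompact (pyNormalize p))) then 1
         else 0) := by
  induction ps generalizing best with
  | nil => simp [pvFindLoop]; omega
  | cons pat ps ih =>
    simp only [pvFindLoop, List.any_cons]
    by_cases hN : (nb == pyNormalize pat) = true
    · simp [hN]
    · rw [if_neg (by simp [hN])]
      simp only [hN, Bool.false_or]
      by_cases hC : (cb == pyCompact (pyNormalize pat)) = true
      · rw [if_pos hC, ih _ (by omega) (by omega)]
        simp only [hC, Bool.true_or]
        split
        · rfl
        · split_ifs <;> omega
      · rw [if_neg hC, pv_if_chain4]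
        have hsub : ((decide (4 ≤ PySem.Str.len (pyNormalize pat)) && PySem.Str.isIn (pyNormalize pat) nb)
            || (decide (4 ≤ PySem.Str.len nb) && PySem.Str.isIn nb (pyNormalize pat))
            || (decide (5 ≤ PySem.Str.len (pyCompact (pyNormalize pat))) && PySem.Str.isIn (pyCompact (pyNormalize pat)) cb)
            || (decide (5 ≤ PySem.Str.len cb) && PySem.Str.isIn cb (pyCompact (pyNormalize pat))))
            = pvSubCond nb cb (pyNormalize pat) (pyCompact (pyNormalize pat)) := by
          simp only [pvSubCond]
        rw [hsub]
        simp only [hC, Bool.false_or]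
        by_cases hS : pvSubCond nb cb (pyNormalize pat) (pyCompact (pyNormalize pat)) = true
        · rw [if_pos hS, ih _ (by omega) (by omega)]
          simp only [hS, Bool.true_or]
          split
          · rfl
          · split_ifs <;> omega
        · rw [if_neg hS, ih _ h0 h2]
          simp only [hS, Bool.false_or]

-- B's set-membership test = exists-scan over the original patterns
theorem pv_set_contains (f : String → String) (nb : String) (l : List String) :
    ((PySem.Set.ofList (l.map f)).contains nb) = l.any (fun p => nb == f p) := by
  rw [Bool.eq_iff_iff]
  simp only [PySem.Set.contains_eq_listContains, List.contains_eq_mem, PySem.Set.mem_ofList,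
    decide_eq_true_eq, List.any_eq_true, beq_iff_eq, List.mem_map]
  constructor
  · rintro ⟨p, hp, rfl⟩
    exact ⟨p, hp, rfl⟩
  · rintro ⟨p, hp, e⟩
    exact ⟨p, hp, e.symm⟩

-- B's compact-set membership test, through both map layers
theorem pv_set_contains2 (f g : String → String) (cb : String) (l : List String) :
    ((PySem.Set.ofList ((l.map f).map g)).contains cb) = l.any (fun p => cb == g (f p)) := by
  rw [Bool.eq_iff_iff]
  simp only [PySem.Set.contains_eq_listContains, List.contains_eq_mem, PySem.Set.mem_ofList,
    decide_eq_true_eq, List.any_eq_true, beq_iff_eq, List.mem_map]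
  constructor
  · rintro ⟨x, ⟨p, hp, rfl⟩, rfl⟩
    exact ⟨p, hp, rfl⟩
  · rintro ⟨p, hp, e⟩
    exact ⟨f p, ⟨p, hp, rfl⟩, e.symm⟩

-- B's zip of the two precomputed form lists scans the original patterns once
theorem pv_zip_any (f g : String → String) (h : String → String → Bool) (l : List String) :
    (((l.map f).zip ((l.map f).map g)).any (fun q => h q.1 q.2))
      = l.any (fun p => h (f p) (g (f p))) := by
  induction l with
  | nil => rfl
  | cons x xs ih => simp only [List.map_cons, List.zip_cons_cons, List.any_cons, ih]

-- ===== VERDICT (by name: the statement is the Claim_ definition above) =====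
theorem find_bone_match_spec : Claim_equal_find_bone_match := by
  intro bone_name patterns _
  unfold Spec_find_bone_match
  simp only [find_bone_match, find_bone_match_alt]
  rw [pvFindLoop_eq _ _ _ _ (by omega) (by omega)]
  rw [pv_set_contains pyNormalize, pv_set_contains2 pyNormalize pyCompact,
    pv_zip_any pyNormalize pyCompact]
  split_ifs <;> omega
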